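-- pv_equiv track=rewrite | github.com/dbunker/SABR | test/Real/Conway/gen-conway.py | combMany
-- ===== SOURCE A (Python) =====
-- def combSimp(val,numVal,soFar,left,acc):
--
-- 	# go through each val
-- 	if len(left) == 0 or numVal == 0:
-- 		acc.append(soFar + ([val]*numVal) + left)
-- 		return
--
-- 	# pick number to place now and later
-- 	for i in range(numVal,-1,-1):
--
-- 		newSoFar = soFar + ([val]*i) + [left[0]]
-- 		newLeft = left[1:]
-- 		newNum = numVal - i
--
-- 		combSimp(val,newNum,newSoFar,newLeft,acc)
--
-- def combMany(li):
-- 	li.reverse()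
--
-- 	newLeftListGroup = [[]]
-- 	for (val,numVal) in li:
--
-- 		leftListGroup = newLeftListGroup
-- 		newLeftListGroup = []
--
-- 		for leftList in leftListGroup:
-- 			combSimp(val,numVal,[],leftList,newLeftListGroup)
--
-- 	return newLeftListGroup
-- ===== SOURCE B (Python) =====
-- def combMany(li):
-- 	li.reverse()
--
-- 	groups = [[]]
-- 	for (val, numVal) in li:
--
-- 		out = []
-- 		for left in groups:
--
-- 			# explicit DFS stack replacing the recursion; frames pushed with i
-- 			# ascending so popping yields i descending, numVal..0
-- 			stack = [(numVal, left, [])]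
-- 			while stack:
-- 				j, lft, soFar = stack.pop()
--
-- 				if len(lft) == 0 or j == 0:
-- 					out.append(soFar + ([val] * j) + lft)
-- 				else:
-- 					first, lrest = lft[0], lft[1:]
-- 					for i in range(0, j + 1):
-- 						stack.append((j - i, lrest, soFar + ([val] * i) + [first]))
--
-- 		groups = out
-- 	return groups
-- ===== Notes on version B (the rewrite author's own statement) =====
-- stated objective: alternative
-- what changed: Replaces the recursive accumulator-threading DFS combSimp by an explicit stack of (numVal, left, soFar) frames inside combMany: frames are pushed with i ascending so popping replays the same descending-i expansion, and results are appended at emit time; no recursion and no helper function remain.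
import Mathlib
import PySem

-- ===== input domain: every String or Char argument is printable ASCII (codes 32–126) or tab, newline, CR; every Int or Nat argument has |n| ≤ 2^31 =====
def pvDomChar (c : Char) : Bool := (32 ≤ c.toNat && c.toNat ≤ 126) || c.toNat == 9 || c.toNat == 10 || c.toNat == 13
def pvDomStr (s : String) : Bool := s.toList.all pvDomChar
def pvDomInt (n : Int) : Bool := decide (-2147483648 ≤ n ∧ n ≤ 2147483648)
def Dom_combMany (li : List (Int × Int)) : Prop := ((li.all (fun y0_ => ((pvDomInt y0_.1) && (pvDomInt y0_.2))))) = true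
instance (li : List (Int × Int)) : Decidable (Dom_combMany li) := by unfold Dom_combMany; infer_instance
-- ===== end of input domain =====

-- B replaces the recursive accumulator DFS by an explicit stack loop (objective: alternative).
-- A (and B) reverse li in place in Python; the equivalence proved here is about the return value.

-- ===== PORT A =====
-- [val]*n in Python: empty for n ≤ 0 (toNat clamps negatives to 0, exact here)
def pvRep (val n : Int) : List Int := List.replicate n.toNat val

def combSimp (val numVal : Int) (soFar : List Int) (left : List Int) (acc : List (List Int)) : List (List Int) :=
  match left with
  | [] => acc ++ [soFar ++ pvRep val numVal ++ []]
  | l0 :: rest =>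
    if numVal = 0 then
      acc ++ [soFar ++ pvRep val numVal ++ (l0 :: rest)]
    else
      (PySem.List.pyRange numVal (-1) (-1)).foldl
        (fun a i => combSimp val (numVal - i) (soFar ++ pvRep val i ++ [l0]) rest a) acc
termination_by structural left

def combMany (li : List (Int × Int)) : List (List Int) :=
  li.reverse.foldl
    (fun leftListGroup p =>
      leftListGroup.foldl (fun newG leftList => combSimp p.1 p.2 [] leftList newG) [])
    [[]]

-- ===== PORT B =====
-- termination measure for the stack loop (cited by combLoop's decreasing_by)
def pvFrameM (f : Int × List Int × List Int) : Nat := (f.1.toNat + 2) ^ f.2.1.length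
def pvStackM (s : List (Int × List Int × List Int)) : Nat := (s.map pvFrameM).sum

theorem pvChildren_lt (val j first : Int) (soFar lrest : List Int) :
    pvStackM (((PySem.List.pyRange 0 (j + 1) 1).map
        (fun i => (j - i, lrest, soFar ++ pvRep val i ++ [first]))).reverse)
      < (j.toNat + 2) ^ (lrest.length + 1) := by
  unfold pvStackM
  rw [List.map_reverse, List.sum_reverse, List.map_map]
  have hb : ∀ x ∈ (PySem.List.pyRange 0 (j + 1) 1).map
      (pvFrameM ∘ fun i => (j - i, lrest, soFar ++ pvRep val i ++ [first])),
      x ≤ (j.toNat + 2) ^ lrest.length := by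
    intro x hx
    rcases List.mem_map.mp hx with ⟨i, hi, rfl⟩
    have hi' := (PySem.List.mem_pyRange_one).mp hi
    simp only [Function.comp_apply, pvFrameM]
    exact Nat.pow_le_pow_left (by omega) _
  calc ((PySem.List.pyRange 0 (j + 1) 1).map
          (pvFrameM ∘ fun i => (j - i, lrest, soFar ++ pvRep val i ++ [first]))).sum
      ≤ ((PySem.List.pyRange 0 (j + 1) 1).map
          (pvFrameM ∘ fun i => (j - i, lrest, soFar ++ pvRep val i ++ [first]))).length
          • ((j.toNat + 2) ^ lrest.length) := List.sum_le_card_nsmul _ _ hb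
    _ = (PySem.List.pyRange 0 (j + 1) 1).length * ((j.toNat + 2) ^ lrest.length) := by
          simp [smul_eq_mul]
    _ < (j.toNat + 2) ^ (lrest.length + 1) := by
          rw [PySem.List.length_pyRange_one, pow_succ,
            mul_comm ((j.toNat + 2) ^ lrest.length) (j.toNat + 2)]
          exact mul_lt_mul_of_pos_right (by omega) (by positivity)

def combLoop (val : Int) (stack : List (Int × List Int × List Int)) (out : List (List Int)) :
    List (List Int) :=
  match stack with
  | [] => out
  | (j, lft, soFar) :: rest =>
    match lft with
    | [] => combLoop val rest (out ++ [soFar ++ pvRep val j ++ []])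
    | first :: lrest =>
      if j = 0 then
        combLoop val rest (out ++ [soFar ++ pvRep val j ++ (first :: lrest)])
      else
        combLoop val
          ((((PySem.List.pyRange 0 (j + 1) 1).map
              (fun i => (j - i, lrest, soFar ++ pvRep val i ++ [first]))).reverse) ++ rest)
          out
termination_by pvStackM stack
decreasing_by
  · simp only [pvStackM, List.map_cons, List.sum_cons]
    have : 0 < pvFrameM (j, [], soFar) := by unfold pvFrameM; positivity
    omega
  · simp only [pvStackM, List.map_cons, List.sum_cons]
    have : 0 < pvFrameM (j, first :: lrest, soFar) := by unfold pvFrameM; positivity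
    omega
  · simp only [pvStackM, List.map_append, List.sum_append]
    have h := pvChildren_lt val j first soFar lrest
    have h2 : pvFrameM (j, first :: lrest, soFar) = (j.toNat + 2) ^ (lrest.length + 1) := by
      simp [pvFrameM]
    simp only [pvStackM] at h
    simp only [List.map_cons, List.sum_cons, h2]
    omega

def combMany_alt (li : List (Int × Int)) : List (List Int) :=
  li.reverse.foldl
    (fun groups p =>
      groups.foldl (fun out left => combLoop p.1 [(p.2, left, [])] out) [])
    [[]]

-- ===== PRECONDITION & SPEC =====
def Spec_combMany (li : List (Int × Int)) (out : List (List Int)) : Prop := out = combMany_alt li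
instance (li : List (Int × Int)) (out : List (List Int)) : Decidable (Spec_combMany li out) := by unfold Spec_combMany; infer_instance

-- ===== CLAIM (what is proved, stated in full; the proofs are below) =====
def Claim_equal_combMany : Prop := ∀ (li : List (Int × Int)), Dom_combMany li → Spec_combMany li (combMany li)

-- ===== LEMMAS AND PROOFS =====

-- B's stack loop folds A's recursive DFS over the pending frames, top of stack first
theorem combLoop_eq_foldl (val : Int) :
    ∀ (stack : List (Int × List Int × List Int)) (out : List (List Int)),
      combLoop val stack out
        = stack.foldl (fun o f => combSimp val f.1 f.2.2 f.2.1 o) out := by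
  intro stack out
  induction stack, out using combLoop.induct (val := val) with
  | case1 out => simp [combLoop]
  | case2 out j soFar rest ih =>
      simp only [combLoop, List.foldl_cons, combSimp]
      exact ih
  | case3 out soFar rest l0 rest_1 ih =>
      simp only [combLoop, List.foldl_cons, combSimp, if_pos]
      exact ih
  | case4 out j soFar rest l0 rest_1 hj ih =>
      simp only [combLoop, if_neg hj]
      rw [ih, List.foldl_append, List.foldl_cons]
      congr 1
      show _ = combSimp val j soFar (l0 :: rest_1) out
      simp only [combSimp, if_neg hj]
      rw [PySem.List.pyRange_neg_one_eq_reverse]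
      have h0 : PySem.List.pyRange ((-1 : Int) + 1) (j + 1) 1 = PySem.List.pyRange 0 (j + 1) 1 := by
        norm_num
      rw [h0, ← List.map_reverse, List.foldl_map]

-- ===== VERDICT (by name: the statement is the Claim_ definition above) =====
theorem combMany_spec : Claim_equal_combMany := by
  intro li _
  unfold Spec_combMany combMany combMany_alt
  have hstep :
      (fun (leftListGroup : List (List Int)) (p : Int × Int) =>
          leftListGroup.foldl (fun newG leftList => combSimp p.1 p.2 [] leftList newG) [])
        = (fun groups p => groups.foldl (fun out left => combLoop p.1 [(p.2, left, [])] out) []) := by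
    funext groups p
    have : (fun (newG : List (List Int)) (leftList : List Int) =>
        combSimp p.1 p.2 [] leftList newG)
      = (fun out left => combLoop p.1 [(p.2, left, [])] out) := by
      funext out left
      rw [combLoop_eq_foldl]
      simp
    rw [this]
  rw [hstep]
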